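-- pv_equiv track=rewrite | github.com/jorge-gago/practicas | 15 t-w-tim/password/verificador.py | mayus_minus
-- ===== SOURCE A (Python) =====
-- def mayus_minus(pas):
--     mayus = False
--     minus = False
--     for i in pas:
--
--         if minus != True : minus = i.islower()
--         if mayus != True : mayus = i.isupper()
--         if minus and mayus :
--             return True
--     return False
-- ===== SOURCE B (Python) =====
-- def mayus_minus(pas):
--     return any(c.islower() for c in pas) and any(c.isupper() for c in pas)
-- ===== Notes on version B (the rewrite author's own statement) =====
-- stated objective: idiomatic
-- what changed: Replaced the fused single loop carrying two mutable flags with two independent short-circuiting any() scans combined with and.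
import Mathlib
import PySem

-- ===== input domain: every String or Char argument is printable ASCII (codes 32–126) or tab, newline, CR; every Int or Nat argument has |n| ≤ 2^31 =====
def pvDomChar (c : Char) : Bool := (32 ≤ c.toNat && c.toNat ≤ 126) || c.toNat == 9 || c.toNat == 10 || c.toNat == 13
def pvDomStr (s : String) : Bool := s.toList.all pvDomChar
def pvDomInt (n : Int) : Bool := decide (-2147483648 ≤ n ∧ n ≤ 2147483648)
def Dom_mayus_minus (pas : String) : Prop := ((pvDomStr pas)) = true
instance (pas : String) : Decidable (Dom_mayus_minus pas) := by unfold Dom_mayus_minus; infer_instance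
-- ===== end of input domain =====

-- B replaces A's single fused loop with two mutable flags by two independent short-circuiting any-scans combined with `and` (idiomatic).


-- ===== PORT A =====
-- loop over the characters with the two flag variables `mayus`, `minus`; early return on both true
def mayusMinusLoop : List Char → Bool → Bool → Bool
  | [], _, _ => false
  | i :: rest, mayus, minus =>
    let minus' := if minus ≠ true then PySem.Chars.islower i else minus
    let mayus' := if mayus ≠ true then PySem.Chars.isupper i else mayus
    if minus' && mayus' then true else mayusMinusLoop rest mayus' minus'

def mayus_minus (pas : String) : Bool := mayusMinusLoop pas.toList false false

-- ===== PORT B =====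
def mayus_minus_alt (pas : String) : Bool :=
  pas.toList.any (fun c => PySem.Chars.islower c) && pas.toList.any (fun c => PySem.Chars.isupper c)

-- ===== PRECONDITION & SPEC =====
def Spec_mayus_minus (pas : String) (out : Bool) : Prop := out = mayus_minus_alt pas
instance (pas : String) (out : Bool) : Decidable (Spec_mayus_minus pas out) := by unfold Spec_mayus_minus; infer_instance

-- ===== CLAIM (what is proved, stated in full; the proofs are below) =====
def Claim_equal_mayus_minus : Prop := ∀ (pas : String), Dom_mayus_minus pas → Spec_mayus_minus pas (mayus_minus pas)

-- ===== LEMMAS AND PROOFS =====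
theorem mayusMinusLoop_eq (cs : List Char) : ∀ (mayus minus : Bool), ¬ (mayus = true ∧ minus = true) →
    mayusMinusLoop cs mayus minus =
      ((minus || cs.any (fun c => PySem.Chars.islower c)) && (mayus || cs.any (fun c => PySem.Chars.isupper c))) := by
  induction cs with
  | nil =>
    intro mayus minus h
    cases mayus <;> cases minus <;> simp_all [mayusMinusLoop]
  | cons i rest ih =>
    intro mayus minus h
    have hl : (if minus ≠ true then PySem.Chars.islower i else minus) = (minus || PySem.Chars.islower i) := by
      cases minus <;> simp
    have hm : (if mayus ≠ true then PySem.Chars.isupper i else mayus) = (mayus || PySem.Chars.isupper i) := by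
      cases mayus <;> simp
    show (if _ && _ then true else mayusMinusLoop rest _ _) = _
    rw [hl, hm]
    by_cases hboth : ((minus || PySem.Chars.islower i) && (mayus || PySem.Chars.isupper i)) = true
    · simp [hboth, List.any_cons]
      cases minus <;> cases mayus <;> simp_all
    · rw [Bool.not_eq_true] at hboth
      rw [hboth]
      simp only [Bool.false_eq_true, if_false]
      rw [ih _ _ (by intro ⟨a, b⟩; rw [a, b] at hboth; simp at hboth)]
      simp [List.any_cons]
      cases minus <;> cases mayus <;> simp_all

-- ===== VERDICT (by name: the statement is the Claim_ definition above) =====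
theorem mayus_minus_spec : Claim_equal_mayus_minus := by
  intro pas _
  show mayus_minus pas = mayus_minus_alt pas
  rw [mayus_minus, mayusMinusLoop_eq _ false false (by simp), mayus_minus_alt]
  simp
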